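-- pv_equiv track=rewrite | github.com/ztx888/HaloWebUI | backend/open_webui/runtime_migrations.py | _parse_postgres_major_version
-- ===== SOURCE A (Python) =====
-- from typing import Any, Optional
--
-- def _parse_postgres_major_version(raw_version: Any) -> Optional[int]:
--     text = str(raw_version).strip()
--     digits: list[str] = []
--     for char in text:
--         if char.isdigit():
--             digits.append(char)
--         elif digits:
--             break
--     if not digits:
--         return None
--     return int("".join(digits))
-- ===== SOURCE B (Python) =====
-- from typing import Any, Optional
--
-- def _parse_postgres_major_version(raw_version: Any) -> Optional[int]:
--     text = str(raw_version).strip()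
--     masked = "".join(c if c.isdigit() else " " for c in text)
--     parts = masked.split()
--     return int(parts[0]) if parts else None
-- ===== Notes on version B (the rewrite author's own statement) =====
-- stated objective: alternative
-- what changed: Replaces A's stateful accumulate-then-break character loop with a staged mask-and-split pipeline: every non-digit is blanked to a space, the string is whitespace-split, and the first piece (the first digit run) is parsed.
import Mathlib
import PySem

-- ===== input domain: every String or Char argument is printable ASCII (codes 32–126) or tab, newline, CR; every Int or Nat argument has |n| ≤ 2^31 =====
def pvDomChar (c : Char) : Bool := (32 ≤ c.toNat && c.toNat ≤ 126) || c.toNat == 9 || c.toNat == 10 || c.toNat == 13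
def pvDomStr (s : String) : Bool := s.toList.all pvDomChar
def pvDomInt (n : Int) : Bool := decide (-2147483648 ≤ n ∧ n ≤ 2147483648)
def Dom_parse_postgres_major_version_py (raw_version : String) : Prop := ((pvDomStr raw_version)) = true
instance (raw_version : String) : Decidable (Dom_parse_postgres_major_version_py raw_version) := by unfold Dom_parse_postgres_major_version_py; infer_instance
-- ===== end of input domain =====

-- B replaces A's accumulate-then-break scan by a staged mask-and-split pipeline (alternative; same cost).

-- ===== PORT A =====
-- the 'for char in text' loop: append digits, break at the first non-digit after digits started
def pvLoopA : List Char → List Char → List Char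
  | [], digits => digits
  | c :: cs, digits =>
    if PySem.Chars.isdigit c then pvLoopA cs (digits ++ [c])
    else if digits ≠ [] then digits
    else pvLoopA cs digits

def parse_postgres_major_version_py (raw_version : String) : Option Int :=
  let text := PySem.Chars.strip raw_version.toList
  let digits := pvLoopA text []
  if digits = [] then none
  else PySem.Int.ofChars? digits   -- int("".join(digits))

-- ===== PORT B =====
-- ''.join(c if c.isdigit() else ' ' for c in text)
def pvMaskB (c : Char) : Char := if PySem.Chars.isdigit c then c else ' '

def parse_postgres_major_version_py_alt (raw_version : String) : Option Int :=
  let text := PySem.Chars.strip raw_version.toList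
  let masked := text.map pvMaskB
  let parts := PySem.Chars.split₀ masked    -- masked.split()
  match parts with
  | [] => none
  | p :: _ => PySem.Int.ofChars? p          -- int(parts[0])

-- ===== PRECONDITION & SPEC =====
def Spec_parse_postgres_major_version_py (raw_version : String) (out : Option Int) : Prop := out = parse_postgres_major_version_py_alt raw_version
instance (raw_version : String) (out : Option Int) : Decidable (Spec_parse_postgres_major_version_py raw_version out) := by unfold Spec_parse_postgres_major_version_py; infer_instance

-- ===== CLAIM (what is proved, stated in full; the proofs are below) =====
def Claim_equal_parse_postgres_major_version_py : Prop := ∀ (raw_version : String), Dom_parse_postgres_major_version_py raw_version → Spec_parse_postgres_major_version_py raw_version (parse_postgres_major_version_py raw_version)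

-- ===== LEMMAS AND PROOFS =====

-- A's loop computes the first contiguous digit run
theorem pvLoopA_nonempty (cs : List Char) (acc : List Char) (h : acc ≠ []) :
    pvLoopA cs acc = acc ++ cs.takeWhile PySem.Chars.isdigit := by
  induction cs generalizing acc with
  | nil => simp [pvLoopA]
  | cons c cs ih =>
    simp only [pvLoopA, List.takeWhile]
    by_cases hd : PySem.Chars.isdigit c
    · rw [if_pos hd, ih _ (by simp), hd]
      simp
    · rw [if_neg hd, if_pos h]
      simp [hd]

theorem pvLoopA_eq (cs : List Char) :
    pvLoopA cs [] = (cs.dropWhile (fun c => !PySem.Chars.isdigit c)).takeWhile PySem.Chars.isdigit := by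
  induction cs with
  | nil => simp [pvLoopA]
  | cons c cs ih =>
    simp only [pvLoopA, List.dropWhile]
    by_cases hd : PySem.Chars.isdigit c
    · rw [if_pos hd, show ([]:List Char) ++ [c] = [c] from rfl, pvLoopA_nonempty cs [c] (by simp)]
      simp [hd]
    · simpa [hd] using ih

-- masking turns 'is a space' into 'is not a digit'
theorem pvMask_isspace (c : Char) : PySem.Chars.isspace (pvMaskB c) = !PySem.Chars.isdigit c := by
  by_cases hd : PySem.Chars.isdigit c
  · have hd' := hd
    simp only [PySem.Chars.isdigit, Bool.and_eq_true, decide_eq_true_eq, Char.le_def] at hd'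
    have h1 : 48 ≤ c.val.toNat := by simpa using UInt32.le_iff_toNat_le.mp hd'.1
    have h2 : c.val.toNat ≤ 57 := by simpa using UInt32.le_iff_toNat_le.mp hd'.2
    have hn : c.toNat = c.val.toNat := rfl
    simp only [pvMaskB, hd, reduceIte, Bool.not_true]
    simp only [PySem.Chars.isspace, hn, Bool.or_eq_false_iff, Bool.and_eq_false_iff,
      decide_eq_false_iff_not]
    omega
  · simp [pvMaskB, hd, PySem.Chars.isspace]

-- accumulator law for split₀.go
theorem pvGo_acc (cs : List Char) (cur : List Char) (acc : List (List Char)) :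
    PySem.Chars.split₀.go cs cur acc = acc.reverse ++ PySem.Chars.split₀.go cs cur [] := by
  induction cs generalizing cur acc with
  | nil =>
    by_cases h : cur.isEmpty <;> simp [PySem.Chars.split₀.go, h]
  | cons c cs ih =>
    by_cases hs : PySem.Chars.isspace c
    · by_cases h : cur.isEmpty
      · simp only [PySem.Chars.split₀.go, hs, h, reduceIte]
        exact ih [] acc
      · simp only [PySem.Chars.split₀.go, hs, h, Bool.false_eq_true, reduceIte]
        rw [ih [] (cur.reverse :: acc), ih [] [cur.reverse]]
        simp
    · simp only [PySem.Chars.split₀.go, hs, Bool.false_eq_true, reduceIte]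
      exact ih (c :: cur) acc

-- with a nonempty current word, the first produced word is cur.reverse ++ leading non-space run
theorem pvGo_head (cs : List Char) (cur : List Char) (h : cur ≠ []) :
    (PySem.Chars.split₀.go cs cur []).head? =
      some (cur.reverse ++ cs.takeWhile (fun c => !PySem.Chars.isspace c)) := by
  induction cs generalizing cur with
  | nil => simp [PySem.Chars.split₀.go, List.isEmpty_iff, h]
  | cons c cs ih =>
    by_cases hs : PySem.Chars.isspace c
    · simp only [PySem.Chars.split₀.go, hs, if_pos, List.isEmpty_iff, h, reduceIte]
      rw [pvGo_acc]
      simp [List.takeWhile, hs]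
    · simp only [PySem.Chars.split₀.go, hs, Bool.false_eq_true, reduceIte]
      rw [ih (c :: cur) (by simp)]
      simp [List.takeWhile, hs]

-- first word of split(): drop leading whitespace, take the non-space run (none if nothing left)
theorem pvSplit_head (cs : List Char) :
    (PySem.Chars.split₀ cs).head? =
      (if cs.dropWhile PySem.Chars.isspace = [] then none
       else some ((cs.dropWhile PySem.Chars.isspace).takeWhile (fun c => !PySem.Chars.isspace c))) := by
  induction cs with
  | nil => simp [PySem.Chars.split₀, PySem.Chars.split₀.go]
  | cons c cs ih =>
    by_cases hs : PySem.Chars.isspace c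
    · simpa [PySem.Chars.split₀, PySem.Chars.split₀.go, hs, List.dropWhile] using ih
    · simp [PySem.Chars.split₀, PySem.Chars.split₀.go, hs, List.dropWhile,
        pvGo_head cs [c] (by simp)]

-- ===== VERDICT (by name: the statement is the Claim_ definition above) =====
theorem parse_postgres_major_version_py_spec : Claim_equal_parse_postgres_major_version_py := by
  intro raw_version _
  unfold Spec_parse_postgres_major_version_py
  unfold parse_postgres_major_version_py parse_postgres_major_version_py_alt
  simp only []
  set t := PySem.Chars.strip raw_version.toList with ht
  -- the masked string's whitespace structure mirrors t's digit structure
  have hdrop : (t.map pvMaskB).dropWhile PySem.Chars.isspace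
      = (t.dropWhile (fun c => !PySem.Chars.isdigit c)).map pvMaskB := by
    rw [List.dropWhile_map]
    have hfun : (PySem.Chars.isspace ∘ pvMaskB) = (fun c => !PySem.Chars.isdigit c) := by
      funext c
      simp [Function.comp, pvMask_isspace]
    rw [hfun]
  have hrun : ((t.dropWhile (fun c => !PySem.Chars.isdigit c)).map pvMaskB).takeWhile
          (fun c => !PySem.Chars.isspace c)
      = (t.dropWhile (fun c => !PySem.Chars.isdigit c)).takeWhile PySem.Chars.isdigit := by
    rw [List.takeWhile_map]
    have hfun : ((fun c => !PySem.Chars.isspace c) ∘ pvMaskB) = PySem.Chars.isdigit := by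
      funext x
      simp [Function.comp, pvMask_isspace]
    rw [hfun]
    refine (List.map_congr_left ?_).trans (List.map_id _)
    intro x hx
    have := List.mem_takeWhile_imp hx
    simp [pvMaskB, this]
  rw [pvLoopA_eq]
  set run := (t.dropWhile (fun c => !PySem.Chars.isdigit c)).takeWhile PySem.Chars.isdigit with hrunDef
  by_cases hempty : t.dropWhile (fun c => !PySem.Chars.isdigit c) = []
  · -- no digit anywhere: run = [] and split produces []
    have h1 : run = [] := by simp [hrunDef, hempty]
    have h2 : (PySem.Chars.split₀ (t.map pvMaskB)).head? = none := by
      rw [pvSplit_head, hdrop, hempty]; simp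
    cases hp : PySem.Chars.split₀ (t.map pvMaskB) with
    | nil => simp [h1]
    | cons p ps => rw [hp] at h2; simp at h2
  · have h2 : (PySem.Chars.split₀ (t.map pvMaskB)).head? = some run := by
      rw [pvSplit_head, hdrop]
      have : (t.dropWhile (fun c => !PySem.Chars.isdigit c)).map pvMaskB ≠ [] := by
        simpa using hempty
      rw [if_neg this, hrun]
    have hrun_ne : run ≠ [] := by
      have hd := List.head?_dropWhile_not (fun c => !PySem.Chars.isdigit c) t
      cases hne : t.dropWhile (fun c => !PySem.Chars.isdigit c) with
      | nil => exact absurd hne hempty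
      | cons d ds =>
        have : PySem.Chars.isdigit d := by
          rw [hne] at hd; simpa using hd
        simp [hrunDef, hne, this]
    cases hp : PySem.Chars.split₀ (t.map pvMaskB) with
    | nil => rw [hp] at h2; simp at h2
    | cons p ps =>
      rw [hp] at h2
      simp only [List.head?] at h2
      have hpr : p = run := by injection h2
      simp [hpr, hrun_ne]
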